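-- pv_equiv track=rewrite | github.com/PechenkoVkysnoe/Python | lab1/functions.py | get_number_word_sentence
-- ===== SOURCE A (Python) =====
-- def get_number_word_sentence(text):
--     list_point = []
--
--     for i in range(len(text)):
--         if text[i] == '.':
--             list_point.append(i)
--
--     number_of_word_in_sentences = []
--
--     for i in range(len(list_point) - 1):
--         number_of_word_in_sentences.append(text.count(' ', list_point[i], list_point[i + 1]) - 1)
--
--     return number_of_word_in_sentences
-- ===== SOURCE B (Python) =====
-- def get_number_word_sentence(text):
--     counts = []
--     cur = None  # running space count since the last period; None before the first period
--     for ch in text: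
--         if ch == '.':
--             if cur is not None:
--                 counts.append(cur - 1)
--             cur = 0
--         elif ch == ' ' and cur is not None:
--             cur += 1
--     return counts
-- ===== Notes on version B (the rewrite author's own statement) =====
-- stated objective: simpler
-- what changed: Replaced the two-pass scheme (collect all period indices, then count spaces over each consecutive index span) by a single streaming pass that keeps one running space counter since the last period and emits count-1 at each subsequent period.
import Mathlib
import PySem

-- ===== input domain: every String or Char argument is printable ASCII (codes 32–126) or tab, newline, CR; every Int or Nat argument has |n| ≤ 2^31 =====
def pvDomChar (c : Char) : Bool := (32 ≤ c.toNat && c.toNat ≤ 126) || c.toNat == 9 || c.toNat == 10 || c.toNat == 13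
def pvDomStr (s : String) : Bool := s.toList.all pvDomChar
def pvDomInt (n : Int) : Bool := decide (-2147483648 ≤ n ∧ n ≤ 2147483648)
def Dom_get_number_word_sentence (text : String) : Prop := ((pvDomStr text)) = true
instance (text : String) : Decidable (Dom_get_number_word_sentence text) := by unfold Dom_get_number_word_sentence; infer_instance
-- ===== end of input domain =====

-- B replaces A's two-pass period-index/span-count scheme by one streaming pass with a running space counter (objective: simpler).

-- ===== PORT A =====
-- text.count(' ', a, b) for the single-char needle ' ' and 0 ≤ a ≤ b ≤ len(text) is exactly
-- the count of ' ' in text[a:b]; ported as (slice …).count ' ' (exact on these in-range bounds).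
def get_number_word_sentence (text : String) : List Int :=
  let cs := text.toList
  let list_point : List Int :=
    (PySem.List.pyRange 0 (cs.length : Int) 1).foldl
      (fun acc i => if PySem.List.pyGet? cs i = some '.' then acc ++ [i] else acc) []
  (PySem.List.pyRange 0 ((list_point.length : Int) - 1) 1).foldl
    (fun acc i =>
      acc ++ [((PySem.List.slice cs (some (PySem.List.pyGetD list_point i 0))
                 (some (PySem.List.pyGetD list_point (i + 1) 0))).count ' ' : Int) - 1]) []

-- ===== PORT B =====
def get_number_word_sentence_alt (text : String) : List Int :=
  (text.toList.foldl
    (fun (st : List Int × Option Int) ch =>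
      if ch = '.' then
        ((match st.2 with
          | some c => st.1 ++ [c - 1]
          | none => st.1), some 0)
      else if ch = ' ' then (st.1, st.2.map (· + 1))
      else st)
    ([], none)).1

-- ===== PRECONDITION & SPEC =====
def Spec_get_number_word_sentence (text : String) (out : List Int) : Prop := out = get_number_word_sentence_alt text
instance (text : String) (out : List Int) : Decidable (Spec_get_number_word_sentence text out) := by unfold Spec_get_number_word_sentence; infer_instance

-- ===== CLAIM (what is proved, stated in full; the proofs are below) =====
def Claim_equal_get_number_word_sentence : Prop := ∀ (text : String), Dom_get_number_word_sentence text → Spec_get_number_word_sentence text (get_number_word_sentence text)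

-- ===== LEMMAS AND PROOFS =====

-- positions of '.' in a char list
def pvDots : List Char → List Nat
  | [] => []
  | c :: l => if c = '.' then 0 :: (pvDots l).map (· + 1) else (pvDots l).map (· + 1)

-- reference form of the result: pvInner k l = counts emitted while scanning l with k spaces
-- accumulated since the last period; pvOuter skips the text before the first period.
def pvInner (k : Int) : List Char → List Int
  | [] => []
  | c :: l => if c = '.' then (k - 1) :: pvInner 0 l
              else pvInner (if c = ' ' then k + 1 else k) l

def pvOuter : List Char → List Int
  | [] => []
  | c :: l => if c = '.' then pvInner 0 l else pvOuter l

theorem pvB_some (l : List Char) : ∀ (res : List Int) (k : Int),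
    (l.foldl (fun (st : List Int × Option Int) ch =>
      if ch = '.' then ((match st.2 with | some c => st.1 ++ [c - 1] | none => st.1), some 0)
      else if ch = ' ' then (st.1, st.2.map (· + 1)) else st) (res, some k)).1
    = res ++ pvInner k l := by
  induction l with
  | nil => intro res k; simp [pvInner]
  | cons c l ih =>
    intro res k
    by_cases h : c = '.'
    · simp [h, pvInner, List.foldl_cons, ih]
    · by_cases h2 : c = ' ' <;> simp [h, h2, pvInner, List.foldl_cons, ih]

theorem pvB_none (l : List Char) : ∀ (res : List Int),
    (l.foldl (fun (st : List Int × Option Int) ch =>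
      if ch = '.' then ((match st.2 with | some c => st.1 ++ [c - 1] | none => st.1), some 0)
      else if ch = ' ' then (st.1, st.2.map (· + 1)) else st) (res, none)).1
    = res ++ pvOuter l := by
  induction l with
  | nil => intro res; simp [pvOuter]
  | cons c l ih =>
    intro res
    by_cases h : c = '.'
    · simp [h, pvOuter, List.foldl_cons, pvB_some]
    · by_cases h2 : c = ' ' <;> simp [h, h2, pvOuter, List.foldl_cons, ih]

theorem pvAlt_eq_outer (text : String) :
    get_number_word_sentence_alt text = pvOuter text.toList := by
  unfold get_number_word_sentence_alt
  simpa using pvB_none text.toList []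

-- the period-index list A builds is pvDots
theorem pvFilter_range (cs : List Char) :
    (List.range cs.length).filter (fun k => decide (cs[k]? = some '.')) = pvDots cs := by
  induction cs with
  | nil => simp [pvDots]
  | cons c l ih =>
    rw [List.length_cons, List.range_succ_eq_map]
    by_cases h : c = '.'
    · simp [pvDots, h, List.filter_map, Function.comp_def, ← ih]
      rfl
    · simp [pvDots, h, List.filter_map, Function.comp_def, ← ih]
      rfl

theorem pvListPoint (cs : List Char) :
    ((PySem.List.pyRange 0 (cs.length : Int) 1).foldl
      (fun acc i => if PySem.List.pyGet? cs i = some '.' then acc ++ [i] else acc) ([] : List Int))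
    = (pvDots cs).map (fun n : Nat => (n : Int)) := by
  rw [← pvFilter_range]
  rw [PySem.List.foldl_append_ite_eq_filter, PySem.List.pyRange_one, List.filter_map]
  simp [Function.comp_def, PySem.List.pyGet?_natCast]

-- consecutive-pairs loop as a zip
theorem pvConsecNat (g : Int → Int → Int) (pts : List Int) :
    (List.range (pts.length - 1)).map (fun k => g (pts.getD k 0) (pts.getD (k + 1) 0))
    = (pts.zip pts.tail).map (fun p => g p.1 p.2) := by
  induction pts with
  | nil => simp
  | cons a pts ih =>
    cases pts with
    | nil => simp
    | cons b t =>
      have hlen : (a :: b :: t).length - 1 = ((b :: t).length - 1) + 1 := by simp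
      rw [hlen, List.range_succ_eq_map, List.map_cons, List.map_map]
      have : ((b :: t).zip (b :: t).tail).map (fun p => g p.1 p.2)
          = (List.range ((b :: t).length - 1)).map
              ((fun k => g ((a :: b :: t).getD k 0) ((a :: b :: t).getD (k + 1) 0)) ∘ Nat.succ) := by
        rw [← ih]
        exact List.map_congr_left (fun k _ => rfl)
      simp only [List.zip_cons_cons, List.tail_cons, List.map_cons] at *
      rw [← this]
      rfl

theorem pvConsec (g : Int → Int → Int) (pts : List Int) :
    (PySem.List.pyRange 0 ((pts.length : Int) - 1) 1).map
      (fun i => g (PySem.List.pyGetD pts i 0) (PySem.List.pyGetD pts (i + 1) 0))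
    = (pts.zip pts.tail).map (fun p => g p.1 p.2) := by
  rw [PySem.List.pyRange_one]
  have hn : (((pts.length : Int) - 1) - 0).toNat = pts.length - 1 := by omega
  rw [hn, List.map_map, ← pvConsecNat g pts]
  refine List.map_congr_left (fun k _ => ?_)
  have h1 : ((0 : Int) + (k : Int)) = ((k : Nat) : Int) := by omega
  have h2 : ((k : Int)) + 1 = ((k + 1 : Nat) : Int) := by omega
  simp only [Function.comp_apply, h1, h2, PySem.List.pyGetD_natCast]

theorem pvInner_char (l : List Char) : ∀ k : Int,
    pvInner k l = match pvDots l with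
      | [] => []
      | d0 :: _ => (k + ((l.take d0).count ' ' : Int) - 1) :: pvInner 0 (l.drop (d0 + 1)) := by
  induction l with
  | nil => intro k; simp [pvInner, pvDots]
  | cons c t ih =>
    intro k
    by_cases h : c = '.'
    · simp [pvInner, pvDots, h]
    · rw [show pvDots (c :: t) = (pvDots t).map (· + 1) by simp [pvDots, h]]
      rw [show pvInner k (c :: t) = pvInner (if c = ' ' then k + 1 else k) t by
        simp [pvInner, h]]
      rw [ih]
      cases hd : pvDots t with
      | nil => simp
      | cons d0 ds =>
        simp only [List.map_cons]
        have htake : ((c :: t).take (d0 + 1)).count ' ' = (t.take d0).count ' ' + (if c = ' ' then 1 else 0) := by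
          by_cases hs : c = ' ' <;> simp [List.take_succ_cons, hs]
        have hdrop : (c :: t).drop (d0 + 1 + 1) = t.drop (d0 + 1) := by simp
        rw [htake, hdrop]
        by_cases hs : c = ' ' <;> (simp [hs]; try ring_nf)

theorem pvOuter_char (l : List Char) :
    pvOuter l = match pvDots l with
      | [] => []
      | d0 :: _ => pvInner 0 (l.drop (d0 + 1)) := by
  induction l with
  | nil => simp [pvOuter, pvDots]
  | cons c t ih =>
    by_cases h : c = '.'
    · simp [pvOuter, pvDots, h]
    · rw [show pvDots (c :: t) = (pvDots t).map (· + 1) by simp [pvDots, h]]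
      rw [show pvOuter (c :: t) = pvOuter t by simp [pvOuter, h]]
      rw [ih]
      cases hd : pvDots t with
      | nil => simp
      | cons d0 ds => simp

theorem pvCore (cs : List Char) :
    ((pvDots cs).zip (pvDots cs).tail).map
      (fun p => ((PySem.List.slice cs (some (p.1 : Int)) (some (p.2 : Int))).count ' ' : Int) - 1)
    = pvOuter cs := by
  induction cs with
  | nil => simp [pvDots, pvOuter]
  | cons c l ih =>
    by_cases h : c = '.'
    · rw [show pvDots (c :: l) = 0 :: (pvDots l).map (· + 1) by simp [pvDots, h]]
      rw [show pvOuter (c :: l) = pvInner 0 l by simp [pvOuter, h]]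
      rw [pvInner_char]
      cases hd : pvDots l with
      | nil => simp
      | cons d0 ds =>
        simp only [List.map_cons, List.tail_cons, List.zip_cons_cons, List.map_cons]
        congr 1
        · -- head element
          rw [PySem.List.slice_natCast]
          simp [h, List.take_succ_cons]
        · -- tail: shift by one
          have e1 : ((d0 + 1) :: List.map (fun x => x + 1) ds) = (pvDots l).map (fun x => x + 1) := by
            rw [hd]; rfl
          have e2 : (List.map (fun x => x + 1) ds : List Nat) = ((pvDots l).map (fun x => x + 1)).tail := by
            rw [hd]; rfl
          rw [e1, e2, ← List.map_tail, List.zip_map, List.map_map]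
          trans (((pvDots l).zip (pvDots l).tail).map
            (fun p => ((PySem.List.slice l (some (p.1 : Int)) (some (p.2 : Int))).count ' ' : Int) - 1))
          · refine List.map_congr_left (fun p _ => ?_)
            obtain ⟨x, y⟩ := p
            show ((PySem.List.slice (c :: l) (some ((x + 1 : Nat) : Int)) (some ((y + 1 : Nat) : Int))).count ' ' : Int) - 1 = _
            rw [PySem.List.slice_natCast, PySem.List.slice_natCast]
            simp [Nat.add_sub_add_right]
          · rw [ih, pvOuter_char, hd]
    · rw [show pvDots (c :: l) = (pvDots l).map (· + 1) by simp [pvDots, h]]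
      rw [show pvOuter (c :: l) = pvOuter l by simp [pvOuter, h]]
      rw [← List.map_tail, List.zip_map, List.map_map, ← ih]
      refine List.map_congr_left (fun p _ => ?_)
      obtain ⟨x, y⟩ := p
      show ((PySem.List.slice (c :: l) (some ((x + 1 : Nat) : Int)) (some ((y + 1 : Nat) : Int))).count ' ' : Int) - 1 = _
      rw [PySem.List.slice_natCast, PySem.List.slice_natCast]
      simp [Nat.add_sub_add_right]

-- ===== VERDICT (by name: the statement is the Claim_ definition above) =====
theorem get_number_word_sentence_spec : Claim_equal_get_number_word_sentence := by
  intro text _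
  unfold Spec_get_number_word_sentence get_number_word_sentence
  rw [pvAlt_eq_outer]
  dsimp only
  rw [pvListPoint]
  rw [PySem.List.foldl_append_singleton_eq_map]
  rw [List.nil_append]
  rw [pvConsec (fun a b => ((PySem.List.slice text.toList (some a) (some b)).count ' ' : Int) - 1)]
  rw [← List.map_tail, List.zip_map, List.map_map]
  rw [← pvCore text.toList]
  exact List.map_congr_left (fun p _ => rfl)
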